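-- pv_equiv track=rewrite | github.com/purenjie/purenjie.github.io | scripts/ai_analysis/utils.py | sentence_length_buckets
-- ===== SOURCE A (Python) =====
-- from typing import Callable, Dict, List, Tuple
--
-- def sentence_length_buckets(lengths: List[int]) -> Dict[str, int]:
--     buckets = {"1-10": 0, "11-20": 0, "21-30": 0, "30+": 0}
--     for l in lengths:
--         if l <= 10:
--             buckets["1-10"] += 1
--         elif l <= 20:
--             buckets["11-20"] += 1
--         elif l <= 30:
--             buckets["21-30"] += 1
--         else:
--             buckets["30+"] += 1
--     return buckets
-- ===== SOURCE B (Python) =====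
-- def sentence_length_buckets(lengths):
--     # prefix counts: number of lengths <= each threshold, then differences
--     c10 = sum(1 for l in lengths if l <= 10)
--     c20 = sum(1 for l in lengths if l <= 20)
--     c30 = sum(1 for l in lengths if l <= 30)
--     n = len(lengths)
--     return {"1-10": c10, "11-20": c20 - c10, "21-30": c30 - c20, "30+": n - c30}
-- ===== Notes on version B (the rewrite author's own statement) =====
-- stated objective: alternative
-- what changed: Replaced the per-element if/elif dict-update loop by three prefix counts (elements <= 10, <= 20, <= 30) whose differences give the four buckets directly.
import Mathlib
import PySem

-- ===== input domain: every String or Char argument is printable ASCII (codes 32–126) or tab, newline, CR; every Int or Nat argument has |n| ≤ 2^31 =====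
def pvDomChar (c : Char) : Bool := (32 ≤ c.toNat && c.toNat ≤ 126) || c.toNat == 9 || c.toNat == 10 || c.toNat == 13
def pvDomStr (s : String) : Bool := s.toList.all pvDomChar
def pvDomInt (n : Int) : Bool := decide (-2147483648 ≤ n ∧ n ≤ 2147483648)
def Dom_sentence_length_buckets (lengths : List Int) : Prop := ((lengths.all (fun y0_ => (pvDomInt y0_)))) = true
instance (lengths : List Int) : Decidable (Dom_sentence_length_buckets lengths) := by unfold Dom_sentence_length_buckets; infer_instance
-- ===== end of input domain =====

-- B computes the four buckets from three prefix counts (<=10, <=20, <=30) by differences,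
-- instead of A's per-element if/elif chain updating a dict; same O(n) cost, different decomposition.

-- ===== PORT A =====
def sentence_length_buckets (lengths : List Int) : List (String × Int) :=
  let buckets : PySem.Dict String Int :=
    PySem.Dict.ofList [("1-10", 0), ("11-20", 0), ("21-30", 0), ("30+", 0)]
  let buckets := lengths.foldl (fun d l =>
    if l ≤ 10 then d.modify "1-10" 0 (· + 1)
    else if l ≤ 20 then d.modify "11-20" 0 (· + 1)
    else if l ≤ 30 then d.modify "21-30" 0 (· + 1)
    else d.modify "30+" 0 (· + 1)) buckets
  buckets.items

-- ===== PORT B =====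
def sentence_length_buckets_alt (lengths : List Int) : List (String × Int) :=
  let c10 : Int := lengths.countP (fun l => l ≤ 10)
  let c20 : Int := lengths.countP (fun l => l ≤ 20)
  let c30 : Int := lengths.countP (fun l => l ≤ 30)
  let n : Int := lengths.length
  [("1-10", c10), ("11-20", c20 - c10), ("21-30", c30 - c20), ("30+", n - c30)]

-- ===== PRECONDITION & SPEC =====
def Spec_sentence_length_buckets (lengths : List Int) (out : List (String × Int)) : Prop := out = sentence_length_buckets_alt lengths
instance (lengths : List Int) (out : List (String × Int)) : Decidable (Spec_sentence_length_buckets lengths out) := by unfold Spec_sentence_length_buckets; infer_instance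

-- ===== CLAIM (what is proved, stated in full; the proofs are below) =====
def Claim_equal_sentence_length_buckets : Prop := ∀ (lengths : List Int), Dom_sentence_length_buckets lengths → Spec_sentence_length_buckets lengths (sentence_length_buckets lengths)

-- ===== LEMMAS AND PROOFS =====

lemma dmod1 (a b c d : Int) : (PySem.Dict.mk [("1-10", a), ("11-20", b), ("21-30", c), ("30+", d)]).modify "1-10" 0 (· + 1) = PySem.Dict.mk [("1-10", a + 1), ("11-20", b), ("21-30", c), ("30+", d)] := by
  simp [PySem.Dict.modify, PySem.Dict.getD, PySem.Dict.get?_mk_cons, PySem.Dict.insert, PySem.Dict.contains]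

lemma dmod2 (a b c d : Int) : (PySem.Dict.mk [("1-10", a), ("11-20", b), ("21-30", c), ("30+", d)]).modify "11-20" 0 (· + 1) = PySem.Dict.mk [("1-10", a), ("11-20", b + 1), ("21-30", c), ("30+", d)] := by
  simp [PySem.Dict.modify, PySem.Dict.getD, PySem.Dict.get?_mk_cons, PySem.Dict.insert, PySem.Dict.contains]

lemma dmod3 (a b c d : Int) : (PySem.Dict.mk [("1-10", a), ("11-20", b), ("21-30", c), ("30+", d)]).modify "21-30" 0 (· + 1) = PySem.Dict.mk [("1-10", a), ("11-20", b), ("21-30", c + 1), ("30+", d)] := by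
  simp [PySem.Dict.modify, PySem.Dict.getD, PySem.Dict.get?_mk_cons, PySem.Dict.insert, PySem.Dict.contains]

lemma dmod4 (a b c d : Int) : (PySem.Dict.mk [("1-10", a), ("11-20", b), ("21-30", c), ("30+", d)]).modify "30+" 0 (· + 1) = PySem.Dict.mk [("1-10", a), ("11-20", b), ("21-30", c), ("30+", d + 1)] := by
  simp [PySem.Dict.modify, PySem.Dict.getD, PySem.Dict.get?_mk_cons, PySem.Dict.insert, PySem.Dict.contains]

-- A's loop over any list, started from the literal four-key dict with values a b c d,
-- adds the count of each band to the corresponding value.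
lemma foldA_mk (L : List Int) (a b c d : Int) :
    (L.foldl (fun d l =>
      if l ≤ 10 then d.modify "1-10" 0 (· + 1)
      else if l ≤ 20 then d.modify "11-20" 0 (· + 1)
      else if l ≤ 30 then d.modify "21-30" 0 (· + 1)
      else d.modify "30+" 0 (· + 1))
      (PySem.Dict.mk [("1-10", a), ("11-20", b), ("21-30", c), ("30+", d)])) =
    PySem.Dict.mk
      [("1-10", a + (L.countP (fun l => l ≤ 10) : Int)),
       ("11-20", b + (L.countP (fun l => 10 < l ∧ l ≤ 20) : Int)),
       ("21-30", c + (L.countP (fun l => 20 < l ∧ l ≤ 30) : Int)),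
       ("30+", d + (L.countP (fun l => 30 < l) : Int))] := by
  induction L generalizing a b c d with
  | nil => simp
  | cons x xs ih =>
    simp only [List.foldl_cons]
    by_cases h1 : x ≤ 10
    · have e1 : decide (x ≤ 10) = true := by simp [h1]
      have e2 : decide (10 < x ∧ x ≤ 20) = false := by simp; omega
      have e3 : decide (20 < x ∧ x ≤ 30) = false := by simp; omega
      have e4 : decide (30 < x) = false := by simp; omega
      rw [if_pos h1, dmod1, ih]
      simp only [PySem.Dict.mk.injEq, List.cons.injEq, Prod.mk.injEq, List.countP_cons,
        e1, e2, e3, e4, reduceIte, and_true, true_and]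
      and_intros <;> push_cast <;> omega
    · by_cases h2 : x ≤ 20
      · have e1 : decide (x ≤ 10) = false := by simp [h1]
        have e2 : decide (10 < x ∧ x ≤ 20) = true := by simp; omega
        have e3 : decide (20 < x ∧ x ≤ 30) = false := by simp; omega
        have e4 : decide (30 < x) = false := by simp; omega
        rw [if_neg h1, if_pos h2, dmod2, ih]
        simp only [PySem.Dict.mk.injEq, List.cons.injEq, Prod.mk.injEq, List.countP_cons,
          e1, e2, e3, e4, reduceIte, and_true, true_and]
        and_intros <;> push_cast <;> omega
      · by_cases h3 : x ≤ 30
        · have e1 : decide (x ≤ 10) = false := by simp [h1]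
          have e2 : decide (10 < x ∧ x ≤ 20) = false := by simp; omega
          have e3 : decide (20 < x ∧ x ≤ 30) = true := by simp; omega
          have e4 : decide (30 < x) = false := by simp; omega
          rw [if_neg h1, if_neg h2, if_pos h3, dmod3, ih]
          simp only [PySem.Dict.mk.injEq, List.cons.injEq, Prod.mk.injEq, List.countP_cons,
            e1, e2, e3, e4, reduceIte, and_true, true_and]
          and_intros <;> push_cast <;> omega
        · have e1 : decide (x ≤ 10) = false := by simp [h1]
          have e2 : decide (10 < x ∧ x ≤ 20) = false := by simp; omega
          have e3 : decide (20 < x ∧ x ≤ 30) = false := by simp; omega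
          have e4 : decide (30 < x) = true := by simp; omega
          rw [if_neg h1, if_neg h2, if_neg h3, dmod4, ih]
          simp only [PySem.Dict.mk.injEq, List.cons.injEq, Prod.mk.injEq, List.countP_cons,
            e1, e2, e3, e4, reduceIte, and_true, true_and]
          and_intros <;> push_cast <;> omega

lemma band_split (L : List Int) :
    ((L.countP (fun l => l ≤ 20) : Int) = (L.countP (fun l => l ≤ 10) : Int) + (L.countP (fun l => 10 < l ∧ l ≤ 20) : Int)) ∧
    ((L.countP (fun l => l ≤ 30) : Int) = (L.countP (fun l => l ≤ 20) : Int) + (L.countP (fun l => 20 < l ∧ l ≤ 30) : Int)) ∧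
    ((L.length : Int) = (L.countP (fun l => l ≤ 30) : Int) + (L.countP (fun l => 30 < l) : Int)) := by
  induction L with
  | nil => simp
  | cons x xs ih =>
    simp only [List.countP_cons, List.length_cons]
    obtain ⟨h1, h2, h3⟩ := ih
    refine ⟨?_, ?_, ?_⟩ <;> by_cases hx10 : x ≤ 10 <;> by_cases hx20 : x ≤ 20 <;>
      by_cases hx30 : x ≤ 30 <;> simp_all <;> omega

-- ===== VERDICT (by name: the statement is the Claim_ definition above) =====
theorem sentence_length_buckets_spec : Claim_equal_sentence_length_buckets := by
  intro L _
  unfold Spec_sentence_length_buckets sentence_length_buckets sentence_length_buckets_alt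
  obtain ⟨h1, h2, h3⟩ := band_split L
  rw [show PySem.Dict.ofList [("1-10", (0:Int)), ("11-20", 0), ("21-30", 0), ("30+", 0)] =
      PySem.Dict.mk [("1-10", 0), ("11-20", 0), ("21-30", 0), ("30+", 0)] by decide]
  simp only [foldA_mk]
  simp only [List.cons.injEq, Prod.mk.injEq, and_true, true_and]
  refine ⟨by omega, by omega, by omega, by omega⟩
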